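-- pv_equiv track=rewrite | github.com/GYMTOPZ/RELAI | backend/services/music_service.py | _create_music_prompt
-- ===== SOURCE A (Python) =====
-- def _create_music_prompt(video_prompt: str) -> str:
--     """
--     Create an appropriate music prompt based on video content
--     """
--     prompt_lower = video_prompt.lower()
--
--     # Gym/Workout content
--     if any(word in prompt_lower for word in ["gym", "workout", "exercise", "fitness", "training"]):
--         return "Energetic upbeat electronic gym workout music, motivational, powerful beats, 128 BPM, modern EDM style"
--
--     # Luxury/Lifestyle content
--     elif any(word in prompt_lower for word in ["luxury", "miami", "beach", "lifestyle"]):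
--         return "Smooth modern hip-hop beat, luxury lifestyle vibes, clean production, laid-back but confident"
--
--     # Tutorial/Educational content
--     elif any(word in prompt_lower for word in ["tutorial", "how to", "guide", "learn", "explain"]):
--         return "Light corporate background music, clean and professional, subtle melody, not distracting"
--
--     # Comedy/Fun content
--     elif any(word in prompt_lower for word in ["funny", "comedy", "joke", "fun"]):
--         return "Playful upbeat music, fun and quirky, lighthearted melody, modern pop elements"
--
--     # Inspirational content
--     elif any(word in prompt_lower for word in ["inspire", "motivation", "success", "dream"]):
--         return "Inspirational uplifting music, emotional but powerful, modern cinematic elements, building progression"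
--
--     # Default - versatile background music
--     else:
--         return "Modern versatile background music, clean production, energetic but not overpowering, perfect for social media"
-- ===== SOURCE B (Python) =====
-- # B: inverted index — a flat keyword -> category-index table and one accumulator pass
-- # computing the minimum matching category index, then a lookup into the prompt array
-- # (no per-group early-return chain).  Objective: alternative decomposition.
-- _PROMPTS = [
--     "Energetic upbeat electronic gym workout music, motivational, powerful beats, 128 BPM, modern EDM style",
--     "Smooth modern hip-hop beat, luxury lifestyle vibes, clean production, laid-back but confident",
--     "Light corporate background music, clean and professional, subtle melody, not distracting",
--     "Playful upbeat music, fun and quirky, lighthearted melody, modern pop elements",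
--     "Inspirational uplifting music, emotional but powerful, modern cinematic elements, building progression",
--     "Modern versatile background music, clean production, energetic but not overpowering, perfect for social media",
-- ]
--
-- _KEYWORD_INDEX = [
--     ("gym", 0), ("workout", 0), ("exercise", 0), ("fitness", 0), ("training", 0),
--     ("luxury", 1), ("miami", 1), ("beach", 1), ("lifestyle", 1),
--     ("tutorial", 2), ("how to", 2), ("guide", 2), ("learn", 2), ("explain", 2),
--     ("funny", 3), ("comedy", 3), ("joke", 3), ("fun", 3),
--     ("inspire", 4), ("motivation", 4), ("success", 4), ("dream", 4),
-- ]
--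
--
-- def _create_music_prompt(video_prompt: str) -> str:
--     low = video_prompt.lower()
--     idx = 5  # default category
--     for word, i in _KEYWORD_INDEX:
--         if word in low and i < idx:
--             idx = i
--     return _PROMPTS[idx]
-- ===== Notes on version B (the rewrite author's own statement) =====
-- stated objective: alternative
-- what changed: Inverted the data: instead of A's ordered if/elif chain of per-category any() checks with early return, B keeps a flat keyword->category-index table, makes one accumulator pass computing the minimum matching category index, and indexes into a prompt array (index 5 = default).
import Mathlib
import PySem

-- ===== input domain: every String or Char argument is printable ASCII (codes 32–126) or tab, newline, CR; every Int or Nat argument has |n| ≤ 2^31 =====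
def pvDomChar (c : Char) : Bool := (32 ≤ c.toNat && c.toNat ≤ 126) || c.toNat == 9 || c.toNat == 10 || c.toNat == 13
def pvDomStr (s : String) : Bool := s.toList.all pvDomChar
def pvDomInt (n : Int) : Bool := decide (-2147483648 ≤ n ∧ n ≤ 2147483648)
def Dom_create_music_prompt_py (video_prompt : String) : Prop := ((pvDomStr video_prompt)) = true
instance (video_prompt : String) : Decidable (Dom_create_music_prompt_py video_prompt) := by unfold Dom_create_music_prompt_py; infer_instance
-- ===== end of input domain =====

-- B inverts the data: a flat keyword -> category-index table, one accumulator pass taking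
-- the minimum matching category index, then a prompt-array lookup (objective: alternative).

-- ===== PORT A =====
def create_music_prompt_py (video_prompt : String) : String :=
  let prompt_lower := PySem.Str.lower video_prompt
  if (["gym", "workout", "exercise", "fitness", "training"].any
      (fun word => PySem.Str.isIn word prompt_lower)) then
    "Energetic upbeat electronic gym workout music, motivational, powerful beats, 128 BPM, modern EDM style"
  else if (["luxury", "miami", "beach", "lifestyle"].any
      (fun word => PySem.Str.isIn word prompt_lower)) then
    "Smooth modern hip-hop beat, luxury lifestyle vibes, clean production, laid-back but confident"
  else if (["tutorial", "how to", "guide", "learn", "explain"].any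
      (fun word => PySem.Str.isIn word prompt_lower)) then
    "Light corporate background music, clean and professional, subtle melody, not distracting"
  else if (["funny", "comedy", "joke", "fun"].any
      (fun word => PySem.Str.isIn word prompt_lower)) then
    "Playful upbeat music, fun and quirky, lighthearted melody, modern pop elements"
  else if (["inspire", "motivation", "success", "dream"].any
      (fun word => PySem.Str.isIn word prompt_lower)) then
    "Inspirational uplifting music, emotional but powerful, modern cinematic elements, building progression"
  else
    "Modern versatile background music, clean production, energetic but not overpowering, perfect for social media"

-- ===== PORT B =====
def pvPrompts : List String :=
  [ "Energetic upbeat electronic gym workout music, motivational, powerful beats, 128 BPM, modern EDM style",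
    "Smooth modern hip-hop beat, luxury lifestyle vibes, clean production, laid-back but confident",
    "Light corporate background music, clean and professional, subtle melody, not distracting",
    "Playful upbeat music, fun and quirky, lighthearted melody, modern pop elements",
    "Inspirational uplifting music, emotional but powerful, modern cinematic elements, building progression",
    "Modern versatile background music, clean production, energetic but not overpowering, perfect for social media" ]

def pvKeywordIndex : List (String × Nat) :=
  [ ("gym", 0), ("workout", 0), ("exercise", 0), ("fitness", 0), ("training", 0),
    ("luxury", 1), ("miami", 1), ("beach", 1), ("lifestyle", 1),
    ("tutorial", 2), ("how to", 2), ("guide", 2), ("learn", 2), ("explain", 2),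
    ("funny", 3), ("comedy", 3), ("joke", 3), ("fun", 3),
    ("inspire", 4), ("motivation", 4), ("success", 4), ("dream", 4) ]

-- the body of Source B's 'if word in low and i < idx: idx = i' loop step
def pvStep (low : String) (idx : Nat) (wi : String × Nat) : Nat :=
  if PySem.Str.isIn wi.1 low && decide (wi.2 < idx) then wi.2 else idx

def create_music_prompt_py_alt (video_prompt : String) : String :=
  let low := PySem.Str.lower video_prompt
  let idx := pvKeywordIndex.foldl (pvStep low) 5
  -- _PROMPTS[idx]: idx is always 0..5, so getD with a dummy default is exact
  pvPrompts.getD idx ""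

-- ===== PRECONDITION & SPEC =====
def Spec_create_music_prompt_py (video_prompt : String) (out : String) : Prop := out = create_music_prompt_py_alt video_prompt
instance (video_prompt : String) (out : String) : Decidable (Spec_create_music_prompt_py video_prompt out) := by unfold Spec_create_music_prompt_py; infer_instance

-- ===== CLAIM =====
def Claim_equal_create_music_prompt_py : Prop := ∀ (video_prompt : String), Dom_create_music_prompt_py video_prompt → Spec_create_music_prompt_py video_prompt (create_music_prompt_py video_prompt)

-- ===== LEMMAS AND PROOFS =====

-- folding pvStep over a group of keywords that all carry the same index k
theorem pvFoldGroup (ws : List String) (k : Nat) (low : String) (acc : Nat) :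
    (ws.map (fun w => (w, k))).foldl (pvStep low) acc =
      if ws.any (fun w => PySem.Str.isIn w low) && decide (k < acc) then k else acc := by
  induction ws generalizing acc with
  | nil => simp
  | cons w ws ih =>
    simp only [List.map_cons, List.foldl_cons, List.any_cons]
    rw [ih]
    unfold pvStep
    dsimp only
    rcases Bool.eq_false_or_eq_true (PySem.Str.isIn w low) with ha | ha <;>
    rcases Bool.eq_false_or_eq_true (ws.any fun w => PySem.Str.isIn w low) with hb | hb <;>
      simp only [ha, hb, Bool.true_or, Bool.false_or, Bool.true_and, Bool.false_and,
        decide_eq_true_eq] <;>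
      split_ifs <;> first | rfl | omega | simp_all

theorem pvKeywordIndex_split : pvKeywordIndex =
    (["gym", "workout", "exercise", "fitness", "training"].map (fun w => (w, 0))) ++
    (["luxury", "miami", "beach", "lifestyle"].map (fun w => (w, 1))) ++
    (["tutorial", "how to", "guide", "learn", "explain"].map (fun w => (w, 2))) ++
    (["funny", "comedy", "joke", "fun"].map (fun w => (w, 3))) ++
    (["inspire", "motivation", "success", "dream"].map (fun w => (w, 4))) := rfl

-- ===== VERDICT =====
theorem create_music_prompt_py_spec : Claim_equal_create_music_prompt_py := by
  intro v _
  unfold Spec_create_music_prompt_py create_music_prompt_py create_music_prompt_py_alt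
  rw [pvKeywordIndex_split]
  simp only [List.foldl_append, pvFoldGroup]
  cases h0 : (["gym", "workout", "exercise", "fitness", "training"].any
      (fun w => PySem.Str.isIn w (PySem.Str.lower v))) <;>
  cases h1 : (["luxury", "miami", "beach", "lifestyle"].any
      (fun w => PySem.Str.isIn w (PySem.Str.lower v))) <;>
  cases h2 : (["tutorial", "how to", "guide", "learn", "explain"].any
      (fun w => PySem.Str.isIn w (PySem.Str.lower v))) <;>
  cases h3 : (["funny", "comedy", "joke", "fun"].any
      (fun w => PySem.Str.isIn w (PySem.Str.lower v))) <;>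
  cases h4 : (["inspire", "motivation", "success", "dream"].any
      (fun w => PySem.Str.isIn w (PySem.Str.lower v))) <;>
    rfl
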